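-- pv_equiv track=rewrite | github.com/oscar345/text-analysis-final-project | named_entity_recognizer_wikipedia/named_entity_recognizer.py | get_data_from_file_ent_file
-- ===== SOURCE A (Python) =====
-- def get_data_from_file_ent_file(entfile):
--     """
--     get the named entities and the wiki urls from the annotated file
--     """
--     ent_urls = list()
--     ent_tags = list()
--     for line in entfile.split("\n"):
--         line = line.split()
--         if line == []:
--             break
--         elif len(line) > 5:
--             ent_urls.append(line[6])
--             ent_tags.append(line[5])
--         else:
--             ent_urls.append("")
--             ent_tags.append("0")
--     return ent_tags, ent_urls
-- ===== SOURCE B (Python) =====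
-- def get_data_from_file_ent_file(entfile):
--     """
--     Single character-level scan: no split() calls at all.  While walking the
--     string once we count the words of the current line and collect the
--     characters of its 6th and 7th whitespace-separated fields; a newline (or
--     the end of the input) finalizes the line, and a line with no words stops
--     the scan.
--     """
--     ent_tags = []
--     ent_urls = []
--     nwords = 0
--     w5 = []
--     w6 = []
--     in_word = False
--     for ch in entfile:
--         if ch == "\n":
--             if nwords == 0:
--                 return ent_tags, ent_urls
--             if nwords > 5:
--                 ent_tags.append("".join(w5))
--                 ent_urls.append("".join(w6))
--             else:
--                 ent_tags.append("0")
--                 ent_urls.append("")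
--             nwords = 0
--             w5 = []
--             w6 = []
--             in_word = False
--         elif ch.isspace():
--             in_word = False
--         else:
--             if not in_word:
--                 nwords += 1
--                 in_word = True
--             if nwords == 6:
--                 w5.append(ch)
--             elif nwords == 7:
--                 w6.append(ch)
--     if nwords == 0:
--         return ent_tags, ent_urls
--     if nwords > 5:
--         ent_tags.append("".join(w5))
--         ent_urls.append("".join(w6))
--     else:
--         ent_tags.append("0")
--         ent_urls.append("")
--     return ent_tags, ent_urls
-- ===== Notes on version B (the rewrite author's own statement) =====
-- stated objective: alternative
-- what changed: B replaces A's decomposition (split the file into lines, re-split each line into a word list, index words 5 and 6) by a single character-level scan that builds no line or word lists: it counts words of the current line and collects the characters of its 6th and 7th fields on the fly, finalizing on each newline and stopping at a wordless line.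
import Mathlib
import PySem

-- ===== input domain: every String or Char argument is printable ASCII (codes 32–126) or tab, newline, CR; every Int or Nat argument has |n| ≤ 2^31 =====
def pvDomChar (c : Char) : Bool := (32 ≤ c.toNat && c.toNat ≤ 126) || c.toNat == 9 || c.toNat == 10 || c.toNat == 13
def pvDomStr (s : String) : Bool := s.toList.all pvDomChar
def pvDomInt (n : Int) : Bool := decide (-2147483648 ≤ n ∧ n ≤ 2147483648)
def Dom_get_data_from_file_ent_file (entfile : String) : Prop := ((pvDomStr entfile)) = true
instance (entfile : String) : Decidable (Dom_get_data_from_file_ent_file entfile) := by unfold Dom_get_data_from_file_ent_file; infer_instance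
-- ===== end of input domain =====

-- B replaces A's split-into-lines-then-split-each-line loop by a single character-level
-- scan that never builds line or word lists (alternative decomposition, same O(n) cost).

-- ===== PORT A =====
-- A's loop over the "\n"-split lines, carrying the two accumulators; break at the first
-- line whose whitespace split is empty.
def pvLoopA : List String → List String → List String → List String × List String
  | [], tags, urls => (tags, urls)
  | l :: rest, tags, urls =>
    let w := PySem.Str.split₀ l
    if w = [] then (tags, urls)
    else if w.length > 5 then
      -- line[6] raises IndexError when len(line) = 6; Pre_ excludes those inputs (getD is unreachable inside Pre_)
      pvLoopA rest (tags ++ [(PySem.List.pyGet? w 5).getD ""]) (urls ++ [(PySem.List.pyGet? w 6).getD ""])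
    else pvLoopA rest (tags ++ ["0"]) (urls ++ [""])

def get_data_from_file_ent_file (entfile : String) : List String × List String :=
  pvLoopA ((PySem.Str.split? entfile "\n").getD []) [] []

-- ===== PORT B =====
-- B's single scan over the characters: nwords counts the words of the current line,
-- w5/w6 collect the characters of its 6th/7th fields, in_word tracks word boundaries;
-- '\n' (or the end of the string) finalizes the line, a line with no words stops the scan.
def pvScanB : List Char → Nat → List Char → List Char → Bool →
    List String → List String → List String × List String
  | [], n, w5, w6, _, tags, urls =>
      if n = 0 then (tags, urls)
      else if n > 5 then (tags ++ [String.ofList w5], urls ++ [String.ofList w6])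
      else (tags ++ ["0"], urls ++ [""])
  | c :: rest, n, w5, w6, inw, tags, urls =>
      if c = '\n' then
        if n = 0 then (tags, urls)
        else if n > 5 then
          pvScanB rest 0 [] [] false (tags ++ [String.ofList w5]) (urls ++ [String.ofList w6])
        else pvScanB rest 0 [] [] false (tags ++ ["0"]) (urls ++ [""])
      else if PySem.Chars.isspace c then pvScanB rest n w5 w6 false tags urls
      else
        let n' := if inw then n else n + 1
        pvScanB rest n' (if n' = 6 then w5 ++ [c] else w5) (if n' = 7 then w6 ++ [c] else w6)
          true tags urls

def get_data_from_file_ent_file_alt (entfile : String) : List String × List String :=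
  pvScanB entfile.toList 0 [] [] false [] []

-- ===== PRECONDITION & SPEC =====
-- Pre_ excludes inputs on which A raises IndexError: a line, before the first blank-splitting
-- line, whose whitespace split has exactly 6 words (then len(line) > 5 holds but line[6] is out of range).
def Pre_get_data_from_file_ent_file (entfile : String) : Prop :=
  ∀ l ∈ ((PySem.Str.split? entfile "\n").getD []).takeWhile (fun l => PySem.Str.split₀ l ≠ []),
    (PySem.Str.split₀ l).length ≠ 6
instance (entfile : String) : Decidable (Pre_get_data_from_file_ent_file entfile) := by
  unfold Pre_get_data_from_file_ent_file; infer_instance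

def pvWitness_get_data_from_file_ent_file : String := "a b c d e f g\nx y"

def Spec_get_data_from_file_ent_file (entfile : String) (out : List String × List String) : Prop := out = get_data_from_file_ent_file_alt entfile
instance (entfile : String) (out : List String × List String) : Decidable (Spec_get_data_from_file_ent_file entfile out) := by unfold Spec_get_data_from_file_ent_file; infer_instance

-- ===== CLAIM (what is proved, stated in full; the proofs are below) =====
def Claim_equal_get_data_from_file_ent_file : Prop := ∀ (entfile : String), Dom_get_data_from_file_ent_file entfile → Pre_get_data_from_file_ent_file entfile → Spec_get_data_from_file_ent_file entfile (get_data_from_file_ent_file entfile)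

-- ===== LEMMAS AND PROOFS =====

-- The "\n"-lines of a character list, by structural recursion (proof-side spec of split?).
def pvLines : List Char → List (List Char)
  | [] => [[]]
  | c :: r =>
    if c = '\n' then [] :: pvLines r
    else
      match pvLines r with
      | [] => [[c]]
      | w :: ws => (c :: w) :: ws

def pvMapFirst (f : List Char → List Char) : List (List Char) → List (List Char)
  | [] => []
  | w :: ws => f w :: ws

-- The state of Chars.split₀.go, folded without producing the word list.
def pvGoPair : List Char → List Char → List (List Char) → List Char × List (List Char)
  | [], cur, acc => (cur, acc)
  | c :: rest, cur, acc =>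
    if PySem.Chars.isspace c then
      pvGoPair rest [] (if cur.isEmpty then acc else cur.reverse :: acc)
    else pvGoPair rest (c :: cur) acc

def pvWords (st : List Char × List (List Char)) : List (List Char) :=
  (if st.1.isEmpty then st.2 else st.1.reverse :: st.2).reverse

theorem pvLines_ne_nil (cs : List Char) : pvLines cs ≠ [] := by
  cases cs with
  | nil => simp [pvLines]
  | cons c r =>
    simp only [pvLines]
    split
    · simp
    · cases h : pvLines r <;> simp

theorem pvLines_no_nl (cs : List Char) (h : '\n' ∉ cs) : pvLines cs = [cs] := by
  induction cs with
  | nil => rfl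
  | cons c r ih =>
    simp only [List.mem_cons, not_or] at h
    simp [pvLines, Ne.symm h.1, ih h.2]

theorem pvLines_append (l r : List Char) (h : '\n' ∉ l) :
    pvLines (l ++ '\n' :: r) = l :: pvLines r := by
  induction l with
  | nil => simp [pvLines]
  | cons c t ih =>
    simp only [List.mem_cons, not_or] at h
    simp [pvLines, Ne.symm h.1, ih h.2]

theorem pvMapFirst_id (l : List (List Char)) : pvMapFirst (fun w => w) l = l := by
  cases l <;> simp [pvMapFirst]

theorem splitOn_go_eq (fuel : Nat) : ∀ (l cur : List Char) (acc : List (List Char)),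
    l.length ≤ fuel →
    PySem.Chars.splitOn.go ['\n'] fuel l cur acc =
      acc.reverse ++ pvMapFirst (fun w => cur.reverse ++ w) (pvLines l) := by
  induction fuel with
  | zero =>
    intro l cur acc h
    have : l = [] := List.length_eq_zero_iff.mp (Nat.le_zero.mp h)
    subst this
    rw [PySem.Chars.splitOn.go]
    simp [pvLines, pvMapFirst]
  | succ fuel ih =>
    intro l cur acc h
    cases l with
    | nil =>
      rw [PySem.Chars.splitOn.go]
      simp [pvLines, pvMapFirst]
      omega
    | cons c rest =>
      rw [PySem.Chars.splitOn.go]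
      simp only [List.length_cons, Nat.succ_le_succ_iff] at h
      by_cases hc : c = '\n'
      · subst hc
        have hpre : ['\n'].isPrefixOf ('\n' :: rest) = true := by simp [List.isPrefixOf]
        simp only [hpre, if_true]
        rw [show List.drop (['\n'].length) ('\n' :: rest) = rest from rfl]
        rw [ih rest [] (cur.reverse :: acc) h]
        simp only [pvLines, pvMapFirst, List.reverse_cons, List.append_assoc,
          List.reverse_nil, List.nil_append, List.singleton_append, List.cons_append]
        cases hr : pvLines rest <;> simp [pvMapFirst]
      · have hpre : ['\n'].isPrefixOf (c :: rest) = false := by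
          simp [List.isPrefixOf, Ne.symm hc]
        simp only [hpre, Bool.false_eq_true, if_false]
        rw [ih rest (c :: cur) acc h]
        simp only [pvLines, hc, if_false]
        cases hr : pvLines rest with
        | nil => exact absurd hr (pvLines_ne_nil rest)
        | cons w ws => simp [pvMapFirst]

-- Top-level bridge: Python's entfile.split("\n") is pvLines of the character list.
theorem split_top (s : String) :
    (PySem.Str.split? s "\n").getD [] = (pvLines s.toList).map String.ofList := by
  have h : PySem.Chars.split? s.toList ['\n'] = some (PySem.Chars.splitOn s.toList ['\n']) := by
    simp [PySem.Chars.split?]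
  rw [PySem.Str.split?]
  show (Option.map (List.map String.ofList) (PySem.Chars.split? s.toList "\n".toList)).getD [] = _
  have : "\n".toList = ['\n'] := rfl
  rw [this, h]
  rw [PySem.Chars.splitOn, splitOn_go_eq (s.toList.length + 1) s.toList [] [] (by omega)]
  simp [pvMapFirst_id]

-- split₀.go computes the words of its folded state.
theorem split₀_go_eq : ∀ (l cur : List Char) (acc : List (List Char)),
    PySem.Chars.split₀.go l cur acc = pvWords (pvGoPair l cur acc) := by
  intro l
  induction l with
  | nil =>
    intro cur acc
    rw [PySem.Chars.split₀.go]
    simp [pvGoPair, pvWords]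
    split <;> simp
  | cons c rest ih =>
    intro cur acc
    rw [PySem.Chars.split₀.go]
    by_cases hs : PySem.Chars.isspace c
    · simp only [hs, if_true, pvGoPair]
      by_cases he : cur.isEmpty <;> simp [he, ih]
    · simp [hs, pvGoPair, ih]

-- getElem? of a one-element append.
theorem getElem?_append_one {α : Type} (acc : List α) (x : α) (i : Nat) :
    (acc ++ [x])[i]? = if i < acc.length then acc[i]? else if i = acc.length then some x else none := by
  rcases Nat.lt_trichotomy i acc.length with h | h | h
  · simp [List.getElem?_append_left h, h]
  · subst h; simp
  · rw [List.getElem?_append_right (by omega)]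
    rw [if_neg (by omega), if_neg (by omega)]
    simp
    omega

-- getElem? through appending a fresh one-element word.
theorem new_word_get (W : List (List Char)) (c : Char) (i : Nat) :
    ((W ++ [[c]])[i]?).getD [] =
      if W.length = i then (W[i]?).getD [] ++ [c] else (W[i]?).getD [] := by
  simp only [getElem?_append_one]
  rcases Nat.lt_trichotomy i W.length with h | h | h
  · simp [h, (show ¬ W.length = i by omega)]
  · simp [h]
  · have hnone : W[i]? = none := by rw [List.getElem?_eq_none_iff]; omega
    simp [(show ¬ i < W.length by omega), (show ¬ i = W.length by omega),
      (show ¬ W.length = i by omega), hnone]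

-- getElem? through extending the last word by one character.
theorem ext_word_get (P : List (List Char)) (x : List Char) (c : Char) (i : Nat) :
    ((P ++ [x ++ [c]])[i]?).getD [] =
      if P.length = i then ((P ++ [x])[i]?).getD [] ++ [c] else ((P ++ [x])[i]?).getD [] := by
  simp only [getElem?_append_one]
  rcases Nat.lt_trichotomy i P.length with h | h | h
  · simp [h, (show ¬ P.length = i by omega)]
  · simp [h]
  · simp [(show ¬ i < P.length by omega), (show ¬ i = P.length by omega),
      (show ¬ P.length = i by omega)]

-- B's scan across the characters of one line updates exactly the abstraction of split₀.go's state.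
theorem scan_line : ∀ (l : List Char), '\n' ∉ l → ∀ (rest cur : List Char)
    (acc : List (List Char)) (tags urls : List String),
    pvScanB (l ++ rest) (pvWords (cur, acc)).length ((pvWords (cur, acc))[5]?.getD [])
        ((pvWords (cur, acc))[6]?.getD []) (!cur.isEmpty) tags urls =
      pvScanB rest (pvWords (pvGoPair l cur acc)).length
        ((pvWords (pvGoPair l cur acc))[5]?.getD [])
        ((pvWords (pvGoPair l cur acc))[6]?.getD []) (!(pvGoPair l cur acc).1.isEmpty) tags urls := by
  intro l
  induction l with
  | nil =>
    intro _ rest cur acc tags urls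
    simp [pvGoPair]
  | cons c t ih =>
    intro hnl rest cur acc tags urls
    have hc : ¬ c = '\n' := fun h => hnl (by simp [h])
    have ht : '\n' ∉ t := fun h => hnl (List.mem_cons_of_mem _ h)
    rw [List.cons_append, pvScanB]
    simp only [hc, if_false]
    by_cases hs : PySem.Chars.isspace c
    · -- whitespace: the state abstraction is unchanged, in_word becomes false
      simp only [hs, if_true]
      have hg : pvGoPair (c :: t) cur acc =
          pvGoPair t [] (if cur.isEmpty then acc else cur.reverse :: acc) := by
        rw [pvGoPair]; simp [hs]
      have hw : pvWords (([] : List Char), (if cur.isEmpty then acc else cur.reverse :: acc)) =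
          pvWords (cur, acc) := by
        by_cases he : cur.isEmpty <;> simp [pvWords, he]
      have hstep := ih ht rest [] (if cur.isEmpty then acc else cur.reverse :: acc) tags urls
      rw [hw] at hstep
      simp only [List.isEmpty_nil, Bool.not_true] at hstep
      rw [hstep, hg]
    · -- word character
      simp only [hs, if_false]
      have hg : pvGoPair (c :: t) cur acc = pvGoPair t (c :: cur) acc := by
        rw [pvGoPair]; simp [hs]
      have hstep := ih ht rest (c :: cur) acc tags urls
      rw [hg]
      cases cur with
      | nil =>
        -- a new word starts
        have hW : pvWords ([c], acc) = pvWords (([] : List Char), acc) ++ [[c]] := by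
          simp [pvWords]
        rw [hW] at hstep
        simp only [List.isEmpty_nil, Bool.not_true, Bool.not_false, List.isEmpty_cons,
          List.length_append, List.length_cons, List.length_nil, Nat.add_zero] at hstep ⊢
        simp only [if_false, Bool.false_eq_true, new_word_get] at hstep ⊢
        have e5 : (if (pvWords (([] : List Char), acc)).length + 1 = 6
              then ((pvWords (([] : List Char), acc))[5]?).getD [] ++ [c]
              else ((pvWords (([] : List Char), acc))[5]?).getD []) =
            (if (pvWords (([] : List Char), acc)).length = 5
              then ((pvWords (([] : List Char), acc))[5]?).getD [] ++ [c]
              else ((pvWords (([] : List Char), acc))[5]?).getD []) := by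
          by_cases h : (pvWords (([] : List Char), acc)).length = 5
          · rw [if_pos (by omega), if_pos h]
          · rw [if_neg (by omega), if_neg h]
        have e6 : (if (pvWords (([] : List Char), acc)).length + 1 = 7
              then ((pvWords (([] : List Char), acc))[6]?).getD [] ++ [c]
              else ((pvWords (([] : List Char), acc))[6]?).getD []) =
            (if (pvWords (([] : List Char), acc)).length = 6
              then ((pvWords (([] : List Char), acc))[6]?).getD [] ++ [c]
              else ((pvWords (([] : List Char), acc))[6]?).getD []) := by
          by_cases h : (pvWords (([] : List Char), acc)).length = 6
          · rw [if_pos (by omega), if_pos h]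
          · rw [if_neg (by omega), if_neg h]
        rw [e5, e6]
        exact hstep
      | cons d t' =>
        -- the current word is extended
        have hW0 : pvWords (d :: t', acc) = acc.reverse ++ [(d :: t').reverse] := by
          simp [pvWords]
        have hW : pvWords (c :: d :: t', acc) = acc.reverse ++ [(d :: t').reverse ++ [c]] := by
          simp [pvWords]
        rw [hW] at hstep
        rw [hW0]
        simp only [List.isEmpty_cons, Bool.not_false, List.length_append, List.length_cons,
          List.length_nil, Nat.add_zero, if_true] at hstep ⊢
        simp only [ext_word_get] at hstep
        have e5 : (if acc.reverse.length + 1 = 6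
              then ((acc.reverse ++ [(d :: t').reverse])[5]?).getD [] ++ [c]
              else ((acc.reverse ++ [(d :: t').reverse])[5]?).getD []) =
            (if acc.reverse.length = 5
              then ((acc.reverse ++ [(d :: t').reverse])[5]?).getD [] ++ [c]
              else ((acc.reverse ++ [(d :: t').reverse])[5]?).getD []) := by
          by_cases h : acc.reverse.length = 5
          · rw [if_pos (by omega), if_pos h]
          · rw [if_neg (by omega), if_neg h]
        have e6 : (if acc.reverse.length + 1 = 7
              then ((acc.reverse ++ [(d :: t').reverse])[6]?).getD [] ++ [c]
              else ((acc.reverse ++ [(d :: t').reverse])[6]?).getD []) =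
            (if acc.reverse.length = 6
              then ((acc.reverse ++ [(d :: t').reverse])[6]?).getD [] ++ [c]
              else ((acc.reverse ++ [(d :: t').reverse])[6]?).getD []) := by
          by_cases h : acc.reverse.length = 6
          · rw [if_pos (by omega), if_pos h]
          · rw [if_neg (by omega), if_neg h]
        rw [e5, e6]
        exact hstep

-- The folded split₀.go state over a whole line abstracts to the line's word list.
theorem words_split₀ (cs : List Char) :
    pvWords (pvGoPair cs [] []) = PySem.Chars.split₀ cs := by
  rw [← split₀_go_eq]; rfl

-- Fresh-state instance of scan_line: scanning a newline-free chunk reaches its word-list state.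
theorem scan_line_fresh (cs : List Char) (h : '\n' ∉ cs) (rest : List Char)
    (tags urls : List String) :
    pvScanB (cs ++ rest) 0 [] [] false tags urls =
      pvScanB rest (PySem.Chars.split₀ cs).length
        (((PySem.Chars.split₀ cs)[5]?).getD []) (((PySem.Chars.split₀ cs)[6]?).getD [])
        (!(pvGoPair cs [] []).1.isEmpty) tags urls := by
  have h0 := scan_line cs h rest [] [] tags urls
  rw [words_split₀] at h0
  simpa [pvWords] using h0

theorem str_split₀_ofList (l : List Char) :
    PySem.Str.split₀ (String.ofList l) = (PySem.Chars.split₀ l).map String.ofList := by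
  rw [PySem.Str.split₀, String.toList_ofList]

theorem word_get (ws : List (List Char)) (i : Nat) :
    (PySem.List.pyGet? (ws.map String.ofList) (i : Int)).getD "" =
      String.ofList ((ws[i]?).getD []) := by
  rw [PySem.List.pyGet?_natCast, List.getElem?_map]
  cases ws[i]? <;> simp <;> rfl

-- One newline-free chunk: B's scan and A's loop agree on a single final line.
theorem last_line_case (cs : List Char) (h : '\n' ∉ cs) (tags urls : List String) :
    pvScanB cs 0 [] [] false tags urls = pvLoopA ((pvLines cs).map String.ofList) tags urls := by
  have h0 := scan_line_fresh cs h [] tags urls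
  rw [List.append_nil] at h0
  rw [h0, pvLines_no_nl cs h, List.map_cons, List.map_nil, pvLoopA]
  simp only [str_split₀_ofList]
  have g5 := word_get (PySem.Chars.split₀ cs) 5
  have g6 := word_get (PySem.Chars.split₀ cs) 6
  norm_num at g5 g6
  by_cases hz : (PySem.Chars.split₀ cs).length = 0
  · have : PySem.Chars.split₀ cs = [] := List.length_eq_zero_iff.mp hz
    simp [pvScanB, this]
  · have hne : ¬ ((PySem.Chars.split₀ cs).map String.ofList = []) := by
      simp [List.map_eq_nil_iff]
      exact fun he => hz (by rw [he]; rfl)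
    by_cases h5 : (PySem.Chars.split₀ cs).length > 5
    · rw [pvScanB, if_neg hz, if_pos h5, if_neg hne,
        if_pos (by simpa using h5), g5, g6, pvLoopA]
    · rw [pvScanB, if_neg hz, if_neg h5, if_neg hne,
        if_neg (by simpa using h5), pvLoopA]

-- Decompose an input at its first newline.
theorem pvDecomp (cs : List Char) :
    '\n' ∉ cs ∨ ∃ l r, cs = l ++ '\n' :: r ∧ '\n' ∉ l := by
  induction cs with
  | nil => left; simp
  | cons c t ih =>
    by_cases hc : c = '\n'
    · right; exact ⟨[], t, by simp [hc], by simp⟩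
    · rcases ih with h | ⟨l, r, he, hl⟩
      · left
        intro hm
        rcases List.mem_cons.mp hm with he | hm'
        · exact hc he.symm
        · exact h hm'
      · right
        refine ⟨c :: l, r, by simp [he], ?_⟩
        intro hm
        rcases List.mem_cons.mp hm with he' | hm'
        · exact hc he'.symm
        · exact hl hm'

-- Main induction over the lines: B's scan equals A's loop run on pvLines.
theorem main_scan : ∀ (n : Nat) (cs : List Char), cs.length ≤ n → ∀ (tags urls : List String),
    pvScanB cs 0 [] [] false tags urls = pvLoopA ((pvLines cs).map String.ofList) tags urls := by
  intro n
  induction n with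
  | zero =>
    intro cs h tags urls
    have : cs = [] := List.length_eq_zero_iff.mp (Nat.le_zero.mp h)
    subst this
    exact last_line_case [] (by simp) tags urls
  | succ n ih =>
    intro cs h tags urls
    rcases pvDecomp cs with hno | ⟨l, r, he, hl⟩
    · exact last_line_case cs hno tags urls
    · subst he
      have hr : r.length ≤ n := by simp [List.length_append] at h; omega
      rw [pvLines_append l r hl, List.map_cons, pvLoopA]
      have h0 := scan_line_fresh l hl ('\n' :: r) tags urls
      rw [h0, pvScanB, if_pos rfl]
      simp only [str_split₀_ofList]
      have g5 := word_get (PySem.Chars.split₀ l) 5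
      have g6 := word_get (PySem.Chars.split₀ l) 6
      norm_num at g5 g6
      by_cases hz : (PySem.Chars.split₀ l).length = 0
      · have : PySem.Chars.split₀ l = [] := List.length_eq_zero_iff.mp hz
        simp [this]
      · have hne : ¬ ((PySem.Chars.split₀ l).map String.ofList = []) := by
          simp [List.map_eq_nil_iff]
          exact fun hx => hz (by rw [hx]; rfl)
        by_cases h5 : (PySem.Chars.split₀ l).length > 5
        · rw [if_neg hz, if_pos h5, if_neg hne, if_pos (by simpa using h5), g5, g6,
            ih r hr _ _]
        · rw [if_neg hz, if_neg h5, if_neg hne, if_neg (by simpa using h5), ih r hr _ _]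

-- ===== VERDICT (by name: the statement is the Claim_ definition above) =====
theorem get_data_from_file_ent_file_spec : Claim_equal_get_data_from_file_ent_file := by
  intro entfile _ _
  unfold Spec_get_data_from_file_ent_file get_data_from_file_ent_file get_data_from_file_ent_file_alt
  rw [split_top, main_scan entfile.toList.length entfile.toList (le_refl _)]
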